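-- pv_equiv track=rewrite | github.com/baiwan-chenhao/rewrite | leetcode_gen_week4.py | solve
-- ===== SOURCE A (Python) =====
-- from typing import List, Tuple
--
-- def solve(nums: List[int]) -> int:
--     total = sum(nums)
--     ans = pre = 0
--     for x in nums:
--         if x:
--             pre += x
--         elif pre * 2 == total:
--             ans += 2
--         elif abs(pre * 2 - total) == 1:
--             ans += 1
--     return ans
-- ===== SOURCE B (Python) =====
-- def solve(nums):
--     ans = 0
--     for i in range(len(nums)):
--         if nums[i] == 0:
--             left = sum(nums[:i])
--             right = sum(nums[i + 1:])
--             if left == right: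
--                 ans += 2
--             elif abs(left - right) == 1:
--                 ans += 1
--     return ans
-- ===== Notes on version B (the rewrite author's own statement) =====
-- stated objective: alternative
-- what changed: Replaced the single running-prefix pass (total precomputed, pre/ans state threaded through the loop) by a stateless index loop that, at each zero, recomputes the left and right sums directly from list slices and compares them.
import Mathlib
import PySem

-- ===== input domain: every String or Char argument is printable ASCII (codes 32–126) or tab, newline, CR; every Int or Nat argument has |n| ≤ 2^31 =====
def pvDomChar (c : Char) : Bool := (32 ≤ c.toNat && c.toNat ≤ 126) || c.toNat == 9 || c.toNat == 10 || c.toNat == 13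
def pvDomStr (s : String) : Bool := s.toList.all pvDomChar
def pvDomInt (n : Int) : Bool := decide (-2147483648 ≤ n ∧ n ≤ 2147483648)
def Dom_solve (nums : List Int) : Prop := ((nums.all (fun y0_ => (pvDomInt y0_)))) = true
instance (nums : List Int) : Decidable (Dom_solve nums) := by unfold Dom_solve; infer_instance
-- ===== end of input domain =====

-- B replaces A's single running-prefix pass (state pre/ans, precomputed total) by a stateless
-- index loop recomputing left/right sums from slices at each zero; alternative decomposition, not faster.

-- ===== PORT A =====
-- loop body of A: state (ans, pre), branching exactly as the Python
def stepA (total : Int) (s : Int × Int) (x : Int) : Int × Int :=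
  if x ≠ 0 then (s.1, s.2 + x)
  else if s.2 * 2 = total then (s.1 + 2, s.2)
  else if (s.2 * 2 - total).natAbs = 1 then (s.1 + 1, s.2)
  else s

def solve (nums : List Int) : Int :=
  let total := nums.sum
  (nums.foldl (stepA total) (0, 0)).1

-- ===== PORT B =====
-- loop body of B: at index i, if nums[i]==0 compare sum(nums[:i]) with sum(nums[i+1:])
def stepB (nums : List Int) (ans : Int) (i : Int) : Int :=
  if PySem.List.pyGetD nums i 0 = 0 then
    let left := (PySem.List.slice nums none (some i)).sum
    let right := (PySem.List.slice nums (some (i + 1)) none).sum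
    if left = right then ans + 2
    else if (left - right).natAbs = 1 then ans + 1
    else ans
  else ans

def solve_alt (nums : List Int) : Int :=
  (PySem.List.pyRange 0 (nums.length : Int) 1).foldl (stepB nums) 0

-- ===== PRECONDITION & SPEC =====
def Spec_solve (nums : List Int) (out : Int) : Prop := out = solve_alt nums
instance (nums : List Int) (out : Int) : Decidable (Spec_solve nums out) := by unfold Spec_solve; infer_instance

-- ===== CLAIM (what is proved, stated in full; the proofs are below) =====
def Claim_equal_solve : Prop := ∀ (nums : List Int), Dom_solve nums → Spec_solve nums (solve nums)

-- ===== LEMMAS AND PROOFS =====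

-- weight contributed by a zero whose prefix sum is `pre`, with grand total `t`
def wgt (t pre : Int) : Int :=
  if pre * 2 = t then 2 else if (pre * 2 - t).natAbs = 1 then 1 else 0

-- structural count: zeros of the list weighted by their prefix sum (offset `p`)
def cnt (t : Int) : List Int → Int → Int
  | [], _ => 0
  | x :: xs, p => (if x = 0 then wgt t p else 0) + cnt t xs (p + x)

theorem foldl_stepA (t : Int) :
    ∀ (xs : List Int) (a p : Int),
      xs.foldl (stepA t) (a, p) = (a + cnt t xs p, p + xs.sum) := by
  intro xs
  induction xs with
  | nil => intro a p; simp [cnt]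
  | cons x xs ih =>
    intro a p
    simp only [List.foldl_cons, List.sum_cons, cnt, stepA, wgt]
    split_ifs with h1 h2 h3 <;> rw [ih] <;> simp_all [Prod.mk.injEq] <;> try omega

theorem cnt_append (t : Int) (v : Int) :
    ∀ (ws : List Int) (p : Int),
      cnt t (ws ++ [v]) p = cnt t ws p + (if v = 0 then wgt t (p + ws.sum) else 0) := by
  intro ws
  induction ws with
  | nil => intro p; simp [cnt]
  | cons x xs ih =>
    intro p
    simp only [List.cons_append, cnt, ih, List.sum_cons]
    ring_nf

theorem foldl_stepB_key :
    ∀ (ys zs : List Int) (a : Int),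
      (PySem.List.pyRange 0 (ys.length : Int) 1).foldl (stepB (ys ++ zs)) a
        = a + cnt (ys ++ zs).sum ys 0 := by
  intro ys
  induction ys using List.reverseRecOn with
  | nil => intro zs a; simp [PySem.List.pyRange_one_eq_nil, cnt]
  | append_singleton ws v ih =>
    intro zs a
    have hlen : ((ws ++ [v]).length : Int) = (ws.length : Int) + 1 := by
      simp
    rw [hlen, PySem.List.pyRange_one_succ_right (by positivity), List.foldl_append]
    have hassoc : (ws ++ [v]) ++ zs = ws ++ (v :: zs) := by simp
    rw [hassoc, ih (v :: zs) a]
    -- evaluate the last step, at index ws.length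
    have hget : PySem.List.pyGetD (ws ++ v :: zs) (ws.length : Int) 0 = v := by
      rw [PySem.List.pyGetD_natCast, List.getD,
          List.getElem?_append_right (Nat.le_refl ws.length)]
      simp
    have hleft : PySem.List.slice (ws ++ v :: zs) none (some (ws.length : Int)) = ws := by
      rw [PySem.List.slice_to_natCast]
      exact List.take_left
    have hright : PySem.List.slice (ws ++ v :: zs) (some ((ws.length : Int) + 1)) none
        = zs := by
      have : (ws.length : Int) + 1 = ((ws.length + 1 : Nat) : Int) := by push_cast; ring
      rw [this, PySem.List.slice_from_natCast]
      rw [show ws ++ v :: zs = (ws ++ [v]) ++ zs by simp,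
          show ws.length + 1 = (ws ++ [v]).length by simp]
      exact List.drop_left
    simp only [List.foldl_cons, List.foldl_nil, stepB, hget, hleft, hright]
    rw [cnt_append]
    by_cases hv : v = 0
    · subst hv
      simp only [wgt, List.sum_append, List.sum_cons, zero_add, if_pos]
      split_ifs with h1 h2 h3 h4 h5 <;> omega
    · simp [hv]

-- ===== VERDICT (by name: the statement is the Claim_ definition above) =====
theorem solve_spec : Claim_equal_solve := by
  intro nums _
  unfold Spec_solve solve solve_alt
  have hA := foldl_stepA nums.sum nums 0 0
  have hB := foldl_stepB_key nums [] 0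
  simp only [List.append_nil] at hB
  simp [hA, hB]
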